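-- pv_equiv track=rewrite | github.com/JamesPenner/MediaManagement | metadata_manager_BAK.py | check_dict_consistency
-- ===== SOURCE A (Python) =====
-- def check_dict_consistency(data_dict):
--     values = [value for value in data_dict.values() if value is not None]
--
--     if len(values) == 0:
--         return None
--     elif len(set(values)) == 1:
--         return values[0]
--     else:
--         return "Error: inconsistent values in dictionary"
-- ===== SOURCE B (Python) =====
-- def check_dict_consistency(data_dict):
--     first = None
--     seen = False
--     inconsistent = False
--     for value in data_dict.values():
--         if value is None:
--             continue
--         if not seen:
--             first = value
--             seen = True
--         elif value != first:
--             inconsistent = True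
--     if not seen:
--         return None
--     if inconsistent:
--         return "Error: inconsistent values in dictionary"
--     return first
-- ===== Notes on version B (the rewrite author's own statement) =====
-- stated objective: simpler
-- what changed: Replaces the build-list-then-build-set-then-count pipeline with a single streaming pass that records the first non-None value and a mismatch flag.
import Mathlib
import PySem

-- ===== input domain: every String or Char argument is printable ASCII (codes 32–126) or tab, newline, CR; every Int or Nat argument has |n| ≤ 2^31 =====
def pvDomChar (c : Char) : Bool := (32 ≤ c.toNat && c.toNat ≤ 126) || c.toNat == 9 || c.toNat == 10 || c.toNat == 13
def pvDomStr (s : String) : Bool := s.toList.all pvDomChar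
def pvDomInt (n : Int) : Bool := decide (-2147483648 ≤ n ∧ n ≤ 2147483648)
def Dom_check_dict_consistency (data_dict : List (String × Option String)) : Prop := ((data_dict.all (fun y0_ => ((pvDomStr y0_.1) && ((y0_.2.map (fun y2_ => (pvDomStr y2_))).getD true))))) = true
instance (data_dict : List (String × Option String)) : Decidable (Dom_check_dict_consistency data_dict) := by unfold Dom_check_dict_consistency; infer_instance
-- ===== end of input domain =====

-- B replaces A's list+set pipeline with one streaming pass (first value + mismatch flag): simpler, no intermediate containers.


-- ===== PORT A =====
def check_dict_consistency (data_dict : List (String × Option String)) : Option String :=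
  let values : List String := data_dict.filterMap (fun kv => kv.2)
  if values.length = 0 then none
  else if (PySem.Set.ofList values).length = 1 then PySem.List.pyGet? values 0
  else some "Error: inconsistent values in dictionary"

-- ===== PORT B =====
def check_dict_consistency_alt (data_dict : List (String × Option String)) : Option String :=
  let st : Option String × Bool :=
    data_dict.foldl (fun st kv =>
      match kv.2 with
      | none => st
      | some v =>
        match st.1 with
        | none => (some v, st.2)
        | some first => (some first, st.2 || (v != first))) (none, false)
  match st with
  | (none, _) => none
  | (some first, inconsistent) =>
    if inconsistent then some "Error: inconsistent values in dictionary" else some first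

-- ===== PRECONDITION & SPEC =====
def Spec_check_dict_consistency (data_dict : List (String × Option String)) (out : Option String) : Prop := out = check_dict_consistency_alt data_dict
instance (data_dict : List (String × Option String)) (out : Option String) : Decidable (Spec_check_dict_consistency data_dict out) := by unfold Spec_check_dict_consistency; infer_instance

-- ===== CLAIM (what is proved, stated in full; the proofs are below) =====
def Claim_equal_check_dict_consistency : Prop := ∀ (data_dict : List (String × Option String)), Dom_check_dict_consistency data_dict → Spec_check_dict_consistency data_dict (check_dict_consistency data_dict)

-- ===== LEMMAS AND PROOFS =====

-- the B-side step function, named for the lemmas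
def cdcStep (st : Option String × Bool) (v : Option String) : Option String × Bool :=
  match v with
  | none => st
  | some v =>
    match st.1 with
    | none => (some v, st.2)
    | some first => (some first, st.2 || (v != first))

theorem cdcStep_eq (st : Option String × Bool) (kv : String × Option String) :
    (fun st (kv : String × Option String) =>
      match kv.2 with
      | none => st
      | some v =>
        match st.1 with
        | none => (some v, st.2)
        | some first => (some first, st.2 || (v != first))) st kv = cdcStep st kv.2 := rfl

-- folding the step over the pairs = folding it over the filtered values
theorem cdc_foldl_filterMap (l : List (String × Option String)) (st : Option String × Bool) :
    l.foldl (fun st kv => cdcStep st kv.2) st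
      = (l.filterMap (fun kv => kv.2)).foldl (fun st v => cdcStep st (some v)) st := by
  have cdcStep_none : ∀ st : Option String × Bool, cdcStep st none = st := fun _ => rfl
  induction l generalizing st with
  | nil => rfl
  | cons kv rest ih =>
    cases h : kv.2 with
    | none => simp only [List.foldl_cons, List.filterMap_cons, h, cdcStep_none]; exact ih st
    | some v => simp only [List.foldl_cons, List.filterMap_cons, h]; exact ih _

-- invariant: once a first value is recorded, the fold only accumulates the mismatch flag
theorem cdc_foldl_some (vs : List String) (f : String) (b : Bool) :
    vs.foldl (fun st v => cdcStep st (some v)) (some f, b)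
      = (some f, b || vs.any (fun v => v != f)) := by
  induction vs generalizing b with
  | nil => simp
  | cons v rest ih =>
    rw [List.foldl_cons]
    show rest.foldl (fun st v => cdcStep st (some v)) (some f, b || (v != f)) = _
    rw [ih]
    simp [Bool.or_assoc]

-- Set.add never shrinks the carrier
theorem cdc_length_le_foldl_add (vs : List String) (s : List String) :
    s.length ≤ (vs.foldl PySem.Set.add s).length := by
  induction vs generalizing s with
  | nil => simp
  | cons v rest ih =>
    refine le_trans ?_ (ih (PySem.Set.add s v))
    simp [PySem.Set.add]
    split <;> simp
  
-- the fold keeps the carrier's length iff every folded element is already present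
theorem cdc_foldl_add_length_eq (vs : List String) (s : List String) :
    (vs.foldl PySem.Set.add s).length = s.length ↔ ∀ x ∈ vs, x ∈ s := by
  induction vs generalizing s with
  | nil => simp
  | cons v rest ih =>
    by_cases h : s.contains v
    · have hmem : v ∈ s := by simpa using h
      have hadd : PySem.Set.add s v = s := by simp [PySem.Set.add, hmem]
      rw [List.foldl_cons, hadd, ih]
      constructor
      · intro hall x hx
        rw [List.mem_cons] at hx
        rcases hx with hx | hx
        · exact hx ▸ hmem
        · exact hall x hx
      · intro hall x hx; exact hall x (List.mem_cons_of_mem _ hx)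
    · have hnmem : v ∉ s := by simpa using h
      have hadd : PySem.Set.add s v = s ++ [v] := by simp [PySem.Set.add, hnmem]
      rw [List.foldl_cons, hadd]
      have hle := cdc_length_le_foldl_add rest (s ++ [v])
      simp only [List.length_append, List.length_singleton] at hle
      constructor
      · intro hlen; omega
      · intro hall
        exact absurd (hall v List.mem_cons_self) hnmem

-- ===== VERDICT (by name: the statement is the Claim_ definition above) =====
theorem check_dict_consistency_spec : Claim_equal_check_dict_consistency := by
  intro data_dict _
  unfold Spec_check_dict_consistency check_dict_consistency check_dict_consistency_alt
  simp only [cdcStep_eq, cdc_foldl_filterMap]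
  cases hvs : data_dict.filterMap (fun kv => kv.2) with
  | nil => simp
  | cons v rest =>
    simp only [List.length_cons, Nat.succ_ne_zero, if_neg, List.foldl_cons]
    have hfold := cdc_foldl_some rest v false
    simp only [cdcStep] at hfold ⊢
    rw [hfold]
    have hset : (PySem.Set.ofList (v :: rest)).length = 1 ↔ ∀ x ∈ rest, x = v := by
      have : PySem.Set.ofList (v :: rest) = rest.foldl PySem.Set.add [v] := by
        simp [PySem.Set.ofList_eq_foldl, PySem.Set.add]
      rw [this]
      have := cdc_foldl_add_length_eq rest [v]
      simp only [List.length_singleton, List.mem_singleton] at this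
      exact this
    by_cases hall : ∀ x ∈ rest, x = v
    · have hany : rest.any (fun x => x != v) = false := by
        simp only [List.any_eq_false, bne_iff_ne, ne_eq, not_not]
        exact hall
      rw [if_pos (hset.mpr hall)]
      simp [hany, PySem.List.pyGet?, PySem.List.pyIdx?]
    · have hany : rest.any (fun x => x != v) = true := by
        simp only [List.any_eq_true, bne_iff_ne, ne_eq]
        push_neg at hall
        exact hall
      rw [if_neg (fun h => hall (hset.mp h))]
      simp [hany]
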